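-- pv_equiv track=rewrite | github.com/RostSIT/TasksInPython | 7.3 Function return value. return statement/73 6 8  написать функцию format_namelist, которая принимает список словарей..py | format_namelist
-- ===== SOURCE A (Python) =====
-- def format_namelist(x):
--     nameLIST = []
--     finishList = []
--     stoka = ''
--     for i in range(len(x)):
--         nameLIST.append(x[i]['name'])
--     if len(nameLIST) == 0:
--         return stoka
--     elif len(nameLIST) == 1:
--         for i in nameLIST:
--             stoka = i
--         return stoka
--     else:
--         for i in range(len(nameLIST)):
--             if i == len(nameLIST):
--                 finishList.append(nameLIST[i])
--             elif i == len(nameLIST) - 1: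
--                 finishList.append('и')
--                 finishList.append(nameLIST[i])
--             elif i == len(nameLIST) - 2:
--                 finishList.append(nameLIST[i])
--             else:
--                 finishList.append(nameLIST[i] + ',')
--     for i in finishList:
--         stoka += i + ' '
--     stoka = stoka[:-1]
--     return stoka
-- ===== SOURCE B (Python) =====
-- def format_namelist(x):
--     names = [d['name'] for d in x]
--     if not names:
--         return ''
--     if len(names) == 1:
--         return names[0]
--     return ', '.join(names[:-1]) + ' и ' + names[-1]
-- ===== Notes on version B (the rewrite author's own statement) =====
-- stated objective: simpler
-- what changed: Replaces A's index-classified branch loop (comma vs plain vs 'и' decided per position) plus trailing-space accumulation and final character chop by a slice-and-join: ', '.join(names[:-1]) + ' и ' + names[-1].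
import Mathlib
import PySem

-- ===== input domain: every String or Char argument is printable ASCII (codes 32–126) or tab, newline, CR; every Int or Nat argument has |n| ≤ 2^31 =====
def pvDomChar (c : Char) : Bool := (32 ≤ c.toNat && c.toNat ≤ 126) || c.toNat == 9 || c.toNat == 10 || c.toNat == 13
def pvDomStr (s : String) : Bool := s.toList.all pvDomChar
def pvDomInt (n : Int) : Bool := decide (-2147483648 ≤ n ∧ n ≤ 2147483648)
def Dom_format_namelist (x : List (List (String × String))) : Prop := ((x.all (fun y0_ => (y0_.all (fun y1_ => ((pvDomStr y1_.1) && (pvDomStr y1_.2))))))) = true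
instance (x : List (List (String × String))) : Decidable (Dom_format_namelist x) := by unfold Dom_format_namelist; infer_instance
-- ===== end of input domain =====

-- B replaces A's per-index branch loop (comma / plain / 'и' decided by position) and the
-- trailing-space chop by one slice-and-join expression; same cost, simpler shape.

-- d['name'] on an association list (Python dict): first matching key
def pvName (d : List (String × String)) : String :=
  PySem.Dict.getD (PySem.Dict.mk d) "name" ""

-- ===== PORT A =====
def format_namelist (x : List (List (String × String))) : String :=
  let nameLIST : List String :=
    (PySem.List.pyRange 0 (PySem.List.len x)).foldl
      (fun acc i => acc ++ [pvName (PySem.List.pyGetD x i [])]) []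
  if PySem.List.len nameLIST = 0 then ""
  else if PySem.List.len nameLIST = 1 then nameLIST.foldl (fun _ i => i) ""
  else
    let finishList : List String :=
      (PySem.List.pyRange 0 (PySem.List.len nameLIST)).foldl
        (fun acc i =>
          if i = PySem.List.len nameLIST then acc ++ [PySem.List.pyGetD nameLIST i ""]
          else if i = PySem.List.len nameLIST - 1 then
            acc ++ ["и"] ++ [PySem.List.pyGetD nameLIST i ""]
          else if i = PySem.List.len nameLIST - 2 then acc ++ [PySem.List.pyGetD nameLIST i ""]
          else acc ++ [PySem.List.pyGetD nameLIST i "" ++ ","]) []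
    let stoka : String := finishList.foldl (fun s i => s ++ i ++ " ") ""
    PySem.Str.slice stoka none (some (-1))

-- ===== PORT B =====
def format_namelist_alt (x : List (List (String × String))) : String :=
  let names : List String := x.map pvName
  if names = [] then ""
  else if PySem.List.len names = 1 then PySem.List.pyGetD names 0 ""
  else
    PySem.Str.join ", " (PySem.List.slice names none (some (-1))) ++ " и " ++
      PySem.List.pyGetD names (-1) ""

-- ===== PRECONDITION & SPEC =====
-- Pre_ excludes exactly the inputs where some dict lacks the key 'name': there Python A
-- (and B alike) raises KeyError.
def Pre_format_namelist (x : List (List (String × String))) : Prop :=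
  ∀ d ∈ x, PySem.Dict.contains (PySem.Dict.mk d) "name" = true
instance (x : List (List (String × String))) : Decidable (Pre_format_namelist x) := by
  unfold Pre_format_namelist; infer_instance
def pvWitness_format_namelist : (List (List (String × String))) :=
  [[("name", "Anna"), ("age", "3")], [("name", "Boris")], [("name", "Vera")]]

def Spec_format_namelist (x : List (List (String × String))) (out : String) : Prop := out = format_namelist_alt x
instance (x : List (List (String × String))) (out : String) : Decidable (Spec_format_namelist x out) := by unfold Spec_format_namelist; infer_instance

-- ===== CLAIM (what is proved, stated in full; the proofs are below) =====
def Claim_equal_format_namelist : Prop := ∀ (x : List (List (String × String))), Dom_format_namelist x → Pre_format_namelist x → Spec_format_namelist x (format_namelist x)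

-- ===== LEMMAS AND PROOFS =====

lemma pv_nameLIST_eq (x : List (List (String × String))) :
    (PySem.List.pyRange 0 (PySem.List.len x)).foldl
      (fun acc i => acc ++ [pvName (PySem.List.pyGetD x i [])]) [] = x.map pvName := by
  rw [PySem.List.foldl_append_singleton_eq_map]
  have := PySem.List.map_pyGetD_pyRange_zero x ([] : List (String × String))
  calc (PySem.List.pyRange 0 (PySem.List.len x)).map (fun i => pvName (PySem.List.pyGetD x i []))
      = ((PySem.List.pyRange 0 (PySem.List.len x)).map (fun j => PySem.List.pyGetD x j [])).map pvName := by
        rw [List.map_map]; rfl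
    _ = x.map pvName := by rw [this]

-- the value of A's finishList loop, for 2 ≤ names.length
lemma pv_finish_eq (names : List String) (h : 2 ≤ names.length) :
    (PySem.List.pyRange 0 (PySem.List.len names)).foldl
      (fun acc i =>
        if i = PySem.List.len names then acc ++ [PySem.List.pyGetD names i ""]
        else if i = PySem.List.len names - 1 then
          acc ++ ["и"] ++ [PySem.List.pyGetD names i ""]
        else if i = PySem.List.len names - 2 then acc ++ [PySem.List.pyGetD names i ""]
        else acc ++ [PySem.List.pyGetD names i "" ++ ","]) [] =
    ((names.take (names.length - 2)).map (· ++ ",")) ++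
      [names.getD (names.length - 2) "", "и", names.getD (names.length - 1) ""] := by
  have hlen : PySem.List.len names = (names.length : Int) := by
    simp [PySem.List.len]
  have hsplit : PySem.List.pyRange 0 (PySem.List.len names) =
      PySem.List.pyRange 0 ((names.length : Int) - 2) ++
        [(names.length : Int) - 2, (names.length : Int) - 1] := by
    rw [hlen, PySem.List.pyRange_one_append 0 ((names.length : Int) - 2) (names.length : Int)
      (by omega) (by omega)]
    rw [PySem.List.pyRange_one_cons (by omega : (names.length : Int) - 2 < names.length)]
    rw [show (names.length : Int) - 2 + 1 = (names.length : Int) - 1 by ring]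
    rw [PySem.List.pyRange_one_cons (by omega : (names.length : Int) - 1 < names.length)]
    rw [PySem.List.pyRange_one_eq_nil (by omega : (names.length : Int) ≤ (names.length : Int) - 1 + 1)]
  rw [hsplit, List.foldl_append]
  rw [PySem.List.foldl_congr_mem (PySem.List.pyRange 0 ((names.length : Int) - 2)) _
    (fun acc i => acc ++ [PySem.List.pyGetD names i "" ++ ","]) []
    (by
      intro acc i hi
      rw [PySem.List.mem_pyRange_one] at hi
      rw [hlen]
      rw [if_neg (by omega), if_neg (by omega), if_neg (by omega)])]
  rw [PySem.List.foldl_append_singleton_eq_map]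
  simp only [List.foldl_cons, List.foldl_nil, List.nil_append, hlen]
  split_ifs <;> try omega
  have h2 : ((names.length : Int) - 2) = ((names.length - 2 : Nat) : Int) := by omega
  have h1 : ((names.length : Int) - 1) = ((names.length - 1 : Nat) : Int) := by omega
  rw [h2, h1, PySem.List.pyGetD_natCast, PySem.List.pyGetD_natCast,
    PySem.List.pyRange_zero_natCast, List.map_map]
  have hmap : (List.range (names.length - 2)).map
      ((fun i => PySem.List.pyGetD names i "" ++ ",") ∘ (fun k : Nat => (k : Int))) =
      (names.take (names.length - 2)).map (· ++ ",") := by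
    have key : ∀ k : Nat, k ≤ names.length →
        (List.range k).map
          ((fun i => PySem.List.pyGetD names i "" ++ ",") ∘ (fun k : Nat => (k : Int))) =
        (names.take k).map (· ++ ",") := by
      intro k
      induction k with
      | zero => intro _; simp
      | succ m ih =>
        intro hm
        rw [List.range_succ, List.map_append, ih (by omega), List.take_add_one]
        simp [PySem.List.pyGetD_natCast, List.getD_eq_getElem?_getD,
          List.getElem?_eq_getElem (by omega : m < names.length)]
        rw [List.take_add_one]
        simp [List.getElem?_map, List.getElem?_eq_getElem (by omega : m < names.length)]
    exact key _ (by omega)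
  rw [hmap]
  simp

-- the space-separated accumulation, on char lists
lemma pv_foldl_space (l : List String) (s0 : String) :
    (l.foldl (fun s i => s ++ i ++ " ") s0).toList =
      s0.toList ++ (l.map (fun i => i.toList ++ [' '])).flatten := by
  induction l generalizing s0 with
  | nil => simp
  | cons a t ih => simp [ih, String.toList_append]

lemma pv_inter_cons (sep a : List Char) (l : List (List Char)) (hl : l ≠ []) :
    sep.intercalate (a :: l) = a ++ sep ++ sep.intercalate l := by
  cases l with
  | nil => exact absurd rfl hl
  | cons b t => simp [List.intercalate]

lemma pv_intercalate_append (sep : List Char) (L M : List (List Char)) (hL : L ≠ []) (hM : M ≠ []) :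
    sep.intercalate (L ++ M) = sep.intercalate L ++ sep ++ sep.intercalate M := by
  induction L with
  | nil => exact absurd rfl hL
  | cons a L ih =>
    cases L with
    | nil =>
      rw [List.cons_append, List.nil_append, pv_inter_cons sep a M hM]
      simp [List.intercalate]
    | cons c L =>
      rw [List.cons_append, pv_inter_cons sep a (c :: L ++ M) (by simp),
        ih (by simp), pv_inter_cons sep a (c :: L) (by simp)]
      simp

lemma pv_flat_space (l : List (List Char)) (hl : l ≠ []) :
    (l.map (fun i => i ++ [' '])).flatten = [' '].intercalate l ++ [' '] := by
  induction l with
  | nil => exact absurd rfl hl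
  | cons a t ih =>
    cases t with
    | nil => simp [List.intercalate]
    | cons b t' =>
      rw [List.map_cons, List.flatten_cons, ih (by simp), pv_inter_cons _ a (b :: t') (by simp)]
      simp

lemma pv_comma_join (T : List String) (p : List Char) :
    [' '].intercalate ((T.map (fun s => s ++ ",")).map String.toList ++ [p]) =
      [',', ' '].intercalate (T.map String.toList ++ [p]) := by
  induction T with
  | nil => simp [List.intercalate]
  | cons a T ih =>
    rw [List.map_cons, List.map_cons, List.cons_append, pv_inter_cons _ _ _ (by simp),
      List.map_cons, List.cons_append, pv_inter_cons _ _ _ (by simp), ih]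
    simp [String.toList_append]

-- ===== VERDICT (by name: the statement is the Claim_ definition above) =====
theorem format_namelist_spec : Claim_equal_format_namelist := by
  intro x _ _
  unfold Spec_format_namelist format_namelist format_namelist_alt
  rw [pv_nameLIST_eq]
  set names := x.map pvName with hn
  by_cases h0 : names = []
  · simp [h0, PySem.List.len]
  · by_cases h1 : names.length = 1
    · obtain ⟨a, ha⟩ := List.length_eq_one_iff.mp h1
      simp [ha, PySem.List.len, PySem.List.pyGetD, PySem.List.pyIdx?, PySem.List.pyGet?]
    · have h2 : 2 ≤ names.length := by
        have := List.length_pos_of_ne_nil h0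
        omega
      have hlen : PySem.List.len names = (names.length : Int) := by simp [PySem.List.len]
      rw [if_neg (by rw [hlen]; omega : ¬ PySem.List.len names = 0),
          if_neg (by rw [hlen]; omega : ¬ PySem.List.len names = 1),
          if_neg h0, if_neg (by rw [hlen]; omega : ¬ PySem.List.len names = 1)]
      rw [pv_finish_eq names h2]
      apply String.toList_inj.mp
      -- abbreviations
      set T : List String := names.take (names.length - 2) with hT
      set p : String := names.getD (names.length - 2) "" with hp
      set q : String := names.getD (names.length - 1) "" with hq
      -- LHS: fold with spaces, then chop the trailing space
      rw [PySem.Str.slice_to_neg_one, pv_foldl_space]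
      have hmap2 : (T.map (· ++ ",") ++ [p, "и", q]).map (fun i => String.toList i ++ [' ']) =
          ((T.map (· ++ ",") ++ [p, "и", q]).map String.toList).map (fun i => i ++ [' ']) := by
        rw [List.map_map]; rfl
      rw [hmap2, pv_flat_space _ (by simp)]
      rw [show ("" : String).toList = [] from rfl, List.nil_append, List.dropLast_concat]
      -- RHS: join/slice
      rw [PySem.List.slice_to_neg_one,
          PySem.List.pyGetD_neg_one names "" h0]
      have hdl : names.dropLast = T ++ [p] := by
        rw [List.dropLast_eq_take, hT, hp,
          show names.length - 1 = (names.length - 2) + 1 by omega, List.take_add_one,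
          List.getD_eq_getElem?_getD, List.getElem?_eq_getElem (by omega : names.length - 2 < names.length)]
        rfl
      have hlast : names.getLast h0 = q := by
        rw [List.getLast_eq_getElem, hq, List.getD_eq_getElem?_getD,
          List.getElem?_eq_getElem (by omega : names.length - 1 < names.length)]
        rfl
      rw [hdl, hlast]
      -- both sides as char-list intercalations
      rw [String.toList_append, String.toList_append]
      have hjoin : (PySem.Str.join ", " (T ++ [p])).toList =
          [',', ' '].intercalate ((T ++ [p]).map String.toList) := by
        simp [PySem.Str.join, PySem.Chars.join]
      rw [hjoin]
      have hLsplit : (T.map (· ++ ",") ++ [p, "и", q]).map String.toList =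
          ((T.map (· ++ ",")).map String.toList ++ [p.toList]) ++ [("и" : String).toList, q.toList] := by
        simp
      rw [hLsplit,
        pv_intercalate_append [' '] _ _ (by simp) (by simp),
        pv_inter_cons [' '] _ _ (by simp),
        pv_comma_join T p.toList]
      simp [List.intercalate, List.map_append]
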